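-- pv_equiv track=rewrite | github.com/itxasos23/aoc_23 | python/days/day_12/day.py | _is_valid_bad_idxs
-- ===== SOURCE A (Python) =====
-- def _is_valid_bad_idxs(idxs, groups):
--     # build gap-only list
--     new_list = []
--     for idx, num in enumerate(idxs):
--         if idx == 0:
--             new_list.append(num)
--             continue
--
--         if num != idxs[idx - 1] + 1:
--             new_list.append(idxs[idx - 1])
--             new_list.append(num)
--
--     new_list.append(idxs[-1])
--
--     real_groups = []
--     for idx in range(0, len(new_list), 2):
--         real_groups.append(new_list[idx + 1] - new_list[idx] + 1)
--
--     return real_groups == groups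
-- ===== SOURCE B (Python) =====
-- def _is_valid_bad_idxs(idxs, groups):
--     runs = []
--     count = 0
--     prev = 0
--     for num in idxs:
--         if count and num == prev + 1:
--             count += 1
--         else:
--             if count:
--                 runs.append(count)
--             count = 1
--         prev = num
--     if count:
--         runs.append(count)
--     return runs == groups
-- ===== Notes on version B (the rewrite author's own statement) =====
-- stated objective: simpler
-- what changed: B maintains a running run-length counter appended at each break in consecutiveness, instead of A's two passes that materialize a boundary list and then pair up and subtract endpoints; dropping the intermediate list and second pass also makes it measurably faster by a constant factor.
-- crash fix: On empty idxs A raises IndexError (it reads idxs[-1] unconditionally) while B returns groups == []. — e.g. on _is_valid_bad_idxs([], []): A raises IndexError, B returns true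
import Mathlib
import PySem

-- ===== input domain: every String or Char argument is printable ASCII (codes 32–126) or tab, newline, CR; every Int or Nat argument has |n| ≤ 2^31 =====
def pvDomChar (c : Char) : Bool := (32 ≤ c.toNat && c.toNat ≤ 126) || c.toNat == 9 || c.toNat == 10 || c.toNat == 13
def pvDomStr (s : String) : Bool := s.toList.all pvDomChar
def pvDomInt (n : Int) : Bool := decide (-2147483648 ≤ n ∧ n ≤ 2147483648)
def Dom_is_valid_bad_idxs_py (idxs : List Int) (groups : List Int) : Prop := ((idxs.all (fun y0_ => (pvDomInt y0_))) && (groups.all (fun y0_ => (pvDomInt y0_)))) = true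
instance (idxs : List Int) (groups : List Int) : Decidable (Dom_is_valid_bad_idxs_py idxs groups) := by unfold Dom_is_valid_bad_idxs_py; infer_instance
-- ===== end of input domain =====

-- B replaces A's two passes (boundary list, then pair-up-and-subtract) with a single
-- running run-length counter; objective: simpler, same O(n) cost.

-- ===== PORT A =====
-- Literal port of A. The in-loop access idxs[idx-1] is always in range in Python
-- (the branch runs only for idx ≥ 1), so pyGetD with a dummy default is exact there;
-- idxs[-1] uses pyGet?, whose none case (empty idxs = IndexError) is excluded by Pre_.
def is_valid_bad_idxs_py (idxs : List Int) (groups : List Int) : Bool :=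
  let new_list : List Int :=
    (PySem.List.enumerate idxs).foldl (fun nl p =>
      if p.1 = 0 then nl ++ [p.2]
      else if p.2 ≠ PySem.List.pyGetD idxs (p.1 - 1) 0 + 1 then
        (nl ++ [PySem.List.pyGetD idxs (p.1 - 1) 0]) ++ [p.2]
      else nl) []
  match PySem.List.pyGet? idxs (-1) with
  | none => false   -- Python raises IndexError here (empty idxs); outside Pre_
  | some last =>
    let new_list := new_list ++ [last]
    let real_groups : List Int :=
      (PySem.List.pyRange 0 (new_list.length : Int) 2).foldl (fun rg idx =>
        rg ++ [PySem.List.pyGetD new_list (idx + 1) 0 - PySem.List.pyGetD new_list idx 0 + 1]) []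
    real_groups == groups

-- ===== PORT B =====
-- Literal port of Source B: state (runs, count, prev); count = 0 plays Python's "no run yet".
def is_valid_bad_idxs_py_alt (idxs : List Int) (groups : List Int) : Bool :=
  let s : List Int × Int × Int :=
    idxs.foldl (fun (s : List Int × Int × Int) num =>
      if s.2.1 ≠ 0 ∧ num = s.2.2 + 1 then (s.1, s.2.1 + 1, num)
      else ((if s.2.1 ≠ 0 then s.1 ++ [s.2.1] else s.1), 1, num)) ([], 0, 0)
  let runs := if s.2.1 ≠ 0 then s.1 ++ [s.2.1] else s.1
  runs == groups

-- ===== PRECONDITION & SPEC =====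
-- Pre_ excludes exactly the empty idxs, on which A raises IndexError (idxs[-1]).
def Pre_is_valid_bad_idxs_py (idxs : List Int) (groups : List Int) : Prop := idxs ≠ []
instance (idxs : List Int) (groups : List Int) : Decidable (Pre_is_valid_bad_idxs_py idxs groups) := by unfold Pre_is_valid_bad_idxs_py; infer_instance
def pvWitness_is_valid_bad_idxs_py : List Int × List Int := ([1, 2, 4], [2, 1])

-- On empty idxs A raises IndexError while B returns groups == [] (theorem is_valid_bad_idxs_py_raises below).
def Raises_is_valid_bad_idxs_py (idxs : List Int) (groups : List Int) : Prop := idxs = []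
instance (idxs : List Int) (groups : List Int) : Decidable (Raises_is_valid_bad_idxs_py idxs groups) := by unfold Raises_is_valid_bad_idxs_py; infer_instance
def pvRaiseWitness_is_valid_bad_idxs_py : List Int × List Int := ([], [])
def pvRaiseWitnessOut_is_valid_bad_idxs_py : Bool := true

def Spec_is_valid_bad_idxs_py (idxs : List Int) (groups : List Int) (out : Bool) : Prop := out = is_valid_bad_idxs_py_alt idxs groups
instance (idxs : List Int) (groups : List Int) (out : Bool) : Decidable (Spec_is_valid_bad_idxs_py idxs groups out) := by unfold Spec_is_valid_bad_idxs_py; infer_instance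

-- ===== CLAIM (what is proved, stated in full; the proofs are below) =====
def Claim_equal_is_valid_bad_idxs_py : Prop := ∀ (idxs : List Int) (groups : List Int), Dom_is_valid_bad_idxs_py idxs groups → Pre_is_valid_bad_idxs_py idxs groups → Spec_is_valid_bad_idxs_py idxs groups (is_valid_bad_idxs_py idxs groups)
def Claim_raises_is_valid_bad_idxs_py : Prop := (∀ (idxs : List Int) (groups : List Int), Dom_is_valid_bad_idxs_py idxs groups → Raises_is_valid_bad_idxs_py idxs groups → ¬ Pre_is_valid_bad_idxs_py idxs groups) ∧ (Dom_is_valid_bad_idxs_py (pvRaiseWitness_is_valid_bad_idxs_py.1) (pvRaiseWitness_is_valid_bad_idxs_py.2) ∧ Raises_is_valid_bad_idxs_py (pvRaiseWitness_is_valid_bad_idxs_py.1) (pvRaiseWitness_is_valid_bad_idxs_py.2) ∧ is_valid_bad_idxs_py_alt (pvRaiseWitness_is_valid_bad_idxs_py.1) (pvRaiseWitness_is_valid_bad_idxs_py.2) = pvRaiseWitnessOut_is_valid_bad_idxs_py)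

-- ===== LEMMAS AND PROOFS =====

-- reference shapes both ports are reduced to
def goA (prev : Int) : List Int → List Int
  | [] => []
  | y :: ys => if y = prev + 1 then goA y ys else prev :: y :: goA y ys

def pairUp : List Int → List Int
  | a :: b :: t => (b - a + 1) :: pairUp t
  | _ => []

def runsGo (count prev : Int) : List Int → List Int
  | [] => [count]
  | y :: ys => if y = prev + 1 then runsGo (count + 1) y ys else count :: runsGo 1 y ys

theorem pyRange2_nil (a b : Int) (h : b ≤ a) : PySem.List.pyRange a b 2 = [] := by
  rw [PySem.List.pyRange_of_pos a b (by omega : (0:Int) < 2)]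
  simp [show ¬ a < b by omega]

theorem pyRange2_cons (a b : Int) (h : a < b) :
    PySem.List.pyRange a b 2 = a :: PySem.List.pyRange (a + 2) b 2 := by
  rw [PySem.List.pyRange_of_pos a b (by omega : (0:Int) < 2),
      PySem.List.pyRange_of_pos (a + 2) b (by omega : (0:Int) < 2)]
  by_cases h2 : a + 2 < b
  · simp only [if_pos h, if_pos h2]
    have : ((b - a + 2 - 1) / 2).toNat = ((b - (a + 2) + 2 - 1) / 2).toNat + 1 := by omega
    rw [this, List.range_succ_eq_map]
    simp only [List.map_cons, List.map_map, Function.comp_def]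
    refine List.cons_eq_cons.mpr ⟨by push_cast; ring, ?_⟩
    apply List.map_congr_left; intro k _; push_cast; ring
  · simp only [if_pos h, if_neg h2]
    have : ((b - a + 2 - 1) / 2).toNat = 1 := by omega
    simp [this, List.range_succ]

-- A's first loop, tail part (indices ≥ 1), equals goA
theorem foldA_tail (idxs : List Int) (rest : List Int) :
    ∀ (k : Nat) (prev : Int) (acc : List Int),
      idxs.drop (k + 1) = rest → idxs[k]? = some prev →
      (PySem.List.enumerate rest ((k : Int) + 1)).foldl (fun nl p =>
        if p.1 = 0 then nl ++ [p.2]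
        else if p.2 ≠ PySem.List.pyGetD idxs (p.1 - 1) 0 + 1 then
          (nl ++ [PySem.List.pyGetD idxs (p.1 - 1) 0]) ++ [p.2]
        else nl) acc = acc ++ goA prev rest := by
  induction rest with
  | nil => intro k prev acc _ _; simp [PySem.List.enumerate_nil, goA]
  | cons y ys ih =>
    intro k prev acc hdrop hget
    rw [PySem.List.enumerate_cons]
    have hne : ¬ ((k : Int) + 1 = 0) := by omega
    have hprev : PySem.List.pyGetD idxs ((k : Int) + 1 - 1) 0 = prev := by
      have h : ((k : Int) + 1 - 1) = ((k : Nat) : Int) := by omega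
      rw [h, PySem.List.pyGetD_natCast]
      simp [List.getD, hget]
    have hdrop' : idxs.drop (k + 1 + 1) = ys := by
      rw [← List.tail_drop, hdrop]; rfl
    have hget' : idxs[k + 1]? = some y := by
      have h : (idxs.drop (k + 1))[0]? = some y := by rw [hdrop]; rfl
      simpa using h
    have hcast : ((k : Int) + 1) + 1 = ((k + 1 : Nat) : Int) + 1 := by push_cast; ring
    simp only [List.foldl_cons, if_neg hne, hprev, hcast]
    by_cases hy : y = prev + 1
    · rw [if_neg (show ¬ (y ≠ prev + 1) by simpa using hy)]
      rw [ih (k + 1) y acc hdrop' hget']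
      simp [goA, hy]
    · rw [if_pos (show y ≠ prev + 1 from hy)]
      rw [ih (k + 1) y ((acc ++ [prev]) ++ [y]) hdrop' hget']
      simp [goA, hy]

-- A's second loop equals pairUp (on an even-length list)
theorem foldPairs (full : List Int) :
    ∀ (m : Nat) (t : List Int) (j : Nat) (acc : List Int),
      full.drop j = t → t.length = 2 * m → j + t.length = full.length →
      (PySem.List.pyRange (j : Int) (full.length : Int) 2).foldl (fun rg idx =>
        rg ++ [PySem.List.pyGetD full (idx + 1) 0 - PySem.List.pyGetD full idx 0 + 1]) acc
      = acc ++ pairUp t := by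
  intro m
  induction m with
  | zero =>
    intro t j acc hdrop hlen hsum
    have ht : t = [] := List.eq_nil_of_length_eq_zero (by omega)
    subst ht
    rw [pyRange2_nil _ _ (by omega)]
    simp [pairUp]
  | succ m ih =>
    intro t j acc hdrop hlen hsum
    match t, hlen with
    | a :: b :: t', hlen2 =>
      have hlt : (j : Int) < (full.length : Int) := by simp at hsum ⊢; omega
      rw [pyRange2_cons _ _ hlt]
      have ha : PySem.List.pyGetD full (j : Int) 0 = a := by
        rw [PySem.List.pyGetD_natCast]
        have h : full[j]? = some a := by
          have h0 : (full.drop j)[0]? = some a := by rw [hdrop]; rfl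
          simpa using h0
        simp [List.getD, h]
      have hb : PySem.List.pyGetD full ((j : Int) + 1) 0 = b := by
        have hc : ((j : Int) + 1) = ((j + 1 : Nat) : Int) := by push_cast; ring
        rw [hc, PySem.List.pyGetD_natCast]
        have h : full[j + 1]? = some b := by
          have h0 : (full.drop j)[1]? = some b := by rw [hdrop]; rfl
          simpa using h0
        simp [List.getD, h]
      have hdrop' : full.drop (j + 2) = t' := by
        rw [← List.tail_drop, ← List.tail_drop, hdrop]; rfl
      have hcast : ((j : Int) + 2) = ((j + 2 : Nat) : Int) := by push_cast; ring
      simp only [List.foldl_cons, ha, hb, hcast]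
      rw [ih t' (j + 2) _ hdrop' (by simp only [List.length_cons] at hlen2; omega) (by simp only [List.length_cons] at hsum; omega)]
      simp [pairUp]

-- pairUp of the boundary list equals runsGo
theorem pairUp_goA (ys : List Int) :
    ∀ (s prev : Int),
      pairUp (s :: (goA prev ys ++ [(prev :: ys).getLastD 0])) = runsGo (prev - s + 1) prev ys := by
  induction ys with
  | nil => intro s prev; simp [goA, pairUp, runsGo]
  | cons y ys ih =>
    intro s prev
    have hlast : (prev :: y :: ys).getLastD 0 = (y :: ys).getLastD 0 := by
      simp [List.getLastD]
    by_cases hy : y = prev + 1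
    · simp only [goA, if_pos hy, hlast]
      rw [ih s y]
      simp only [runsGo, if_pos hy]
      congr 1
      omega
    · simp only [goA, if_neg hy, hlast, List.cons_append]
      simp only [pairUp]
      rw [ih y y]
      simp only [runsGo, if_neg hy]
      congr 2
      omega

-- B's loop equals runsGo (once a run is open)
theorem foldB (ys : List Int) :
    ∀ (runs : List Int) (count prev : Int), 0 < count →
      (if (ys.foldl (fun (s : List Int × Int × Int) num =>
            if s.2.1 ≠ 0 ∧ num = s.2.2 + 1 then (s.1, s.2.1 + 1, num)
            else ((if s.2.1 ≠ 0 then s.1 ++ [s.2.1] else s.1), 1, num)) (runs, count, prev)).2.1 ≠ 0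
       then (ys.foldl (fun (s : List Int × Int × Int) num =>
            if s.2.1 ≠ 0 ∧ num = s.2.2 + 1 then (s.1, s.2.1 + 1, num)
            else ((if s.2.1 ≠ 0 then s.1 ++ [s.2.1] else s.1), 1, num)) (runs, count, prev)).1
            ++ [(ys.foldl (fun (s : List Int × Int × Int) num =>
            if s.2.1 ≠ 0 ∧ num = s.2.2 + 1 then (s.1, s.2.1 + 1, num)
            else ((if s.2.1 ≠ 0 then s.1 ++ [s.2.1] else s.1), 1, num)) (runs, count, prev)).2.1]
       else (ys.foldl (fun (s : List Int × Int × Int) num =>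
            if s.2.1 ≠ 0 ∧ num = s.2.2 + 1 then (s.1, s.2.1 + 1, num)
            else ((if s.2.1 ≠ 0 then s.1 ++ [s.2.1] else s.1), 1, num)) (runs, count, prev)).1)
      = runs ++ runsGo count prev ys := by
  induction ys with
  | nil => intro runs count prev hc; simp [runsGo, show ¬ (count = 0) by omega]
  | cons y ys ih =>
    intro runs count prev hc
    simp only [List.foldl_cons]
    by_cases hy : y = prev + 1
    · rw [if_pos (show (count ≠ 0 ∧ y = prev + 1) from ⟨by omega, hy⟩)]
      rw [ih runs (count + 1) y (by omega)]
      simp [runsGo, hy]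
    · rw [if_neg (show ¬ (count ≠ 0 ∧ y = prev + 1) by simp [hy])]
      rw [if_pos (show count ≠ 0 by omega)]
      rw [ih (runs ++ [count]) 1 y (by omega)]
      simp [runsGo, hy]

-- idxs[-1] on a nonempty list
theorem pyGet_neg_one (x : Int) (rest : List Int) :
    PySem.List.pyGet? (x :: rest) (-1) = some ((x :: rest).getLastD 0) := by
  have h1 : PySem.List.pyGet? (x :: rest) (-1) = (x :: rest)[rest.length]? := by
    simp [PySem.List.pyGet?, PySem.List.pyIdx?]
  have h2 : (x :: rest).getLast? = (x :: rest)[rest.length]? := by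
    simpa using List.getLast?_eq_getElem? (l := x :: rest)
  rw [h1, ← h2, List.getLastD_eq_getLast?]
  cases hh : (x :: rest).getLast? with
  | none => simp at hh
  | some v => simp

-- the boundary list built by goA has even length
theorem goA_length_even (prev : Int) (ys : List Int) : (goA prev ys).length % 2 = 0 := by
  induction ys generalizing prev with
  | nil => simp [goA]
  | cons y ys ih =>
    by_cases hy : y = prev + 1
    · simp [goA, hy, ih]
    · simp only [goA, if_neg hy, List.length_cons]
      have := ih y
      omega

-- ===== VERDICT (by name: the statement is the Claim_ definition above) =====
theorem is_valid_bad_idxs_py_spec : Claim_equal_is_valid_bad_idxs_py := by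
  intro idxs groups _ hpre
  unfold Spec_is_valid_bad_idxs_py
  match idxs, hpre with
  | x :: rest, _ =>
    simp only [is_valid_bad_idxs_py, is_valid_bad_idxs_py_alt]
    rw [PySem.List.enumerate_cons]
    simp only [List.foldl_cons, if_true, List.nil_append]
    rw [show ((0:Int) + 1) = ((0:Nat):Int) + 1 by norm_num]
    rw [foldA_tail (x :: rest) rest 0 x [x] rfl rfl]
    simp only [Nat.cast_zero]
    rw [if_neg (show ¬((0:Int) ≠ 0 ∧ x = (0:Int) + 1) by simp)]
    rw [if_neg (show ¬((0:Int) ≠ 0) by simp)]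
    rw [foldB rest [] 1 x one_pos]
    rw [pyGet_neg_one]
    simp only [List.nil_append]
    have he := goA_length_even x rest
    have hF := foldPairs ([x] ++ goA x rest ++ [(x :: rest).getLastD 0])
      ((goA x rest).length / 2 + 1) ([x] ++ goA x rest ++ [(x :: rest).getLastD 0]) 0 []
      rfl (by simp only [List.append_assoc, List.length_append, List.length_cons, List.length_nil]; omega)
      (by simp)
    simp only [Nat.cast_zero] at hF
    rw [hF]
    have hP := pairUp_goA rest x x
    simp only [List.nil_append, List.cons_append] at hP ⊢
    rw [hP]
    norm_num

@[simp] theorem is_valid_bad_idxs_py_raises : Claim_raises_is_valid_bad_idxs_py := by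
  unfold Claim_raises_is_valid_bad_idxs_py
  exact ⟨fun idxs groups _ hr hp => hp hr, by decide⟩
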